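-- pv_equiv track=rewrite | github.com/ionik0/Retail-Genie-0.1 | recommender-fastapi/models/trained_agent.py | rank_customer_intent
-- ===== SOURCE A (Python) =====
-- def rank_customer_intent(customer_message: str) -> str:
--     """Detect customer intent from message"""
--     msg_lower = customer_message.lower()
--
--     if any(w in msg_lower for w in ['party', 'celebration', 'event']):
--         return "party_wear"
--     elif any(w in msg_lower for w in ['wedding', 'bride', 'ceremony']):
--         return "wedding"
--     elif any(w in msg_lower for w in ['office', 'formal', 'work', 'corporate']):
--         return "formal"
--     elif any(w in msg_lower for w in ['casual', 'everyday', 'comfort']):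
--         return "casual"
--     elif any(w in msg_lower for w in ['shoe', 'footwear', 'boot']):
--         return "shoes"
--     elif any(w in msg_lower for w in ['price', 'cost', 'budget', 'under', 'cheap']):
--         return "price_inquiry"
--     elif any(w in msg_lower for w in ['help', 'guide', 'how', 'assist']):
--         return "help"
--     elif any(w in msg_lower for w in ['buy', 'purchase', 'checkout', 'cart']):
--         return "purchase"
--     else:
--         return "browse"
-- ===== SOURCE B (Python) =====
-- PRIORITY = {
--     'party': 0, 'celebration': 0, 'event': 0,
--     'wedding': 1, 'bride': 1, 'ceremony': 1,
--     'office': 2, 'formal': 2, 'work': 2, 'corporate': 2,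
--     'casual': 3, 'everyday': 3, 'comfort': 3,
--     'shoe': 4, 'footwear': 4, 'boot': 4,
--     'price': 5, 'cost': 5, 'budget': 5, 'under': 5, 'cheap': 5,
--     'help': 6, 'guide': 6, 'how': 6, 'assist': 6,
--     'buy': 7, 'purchase': 7, 'checkout': 7, 'cart': 7,
-- }
-- INTENTS = ['party_wear', 'wedding', 'formal', 'casual', 'shoes',
--            'price_inquiry', 'help', 'purchase', 'browse']
--
-- def rank_customer_intent(customer_message: str) -> str:
--     """Detect customer intent from message"""
--     msg = customer_message.lower()
--     best = len(INTENTS) - 1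
--     for i in range(len(msg)):
--         for word, rank in PRIORITY.items():
--             if rank < best and msg[i:i + len(word)] == word:
--                 best = rank
--     return INTENTS[best]
-- ===== Notes on version B (the rewrite author's own statement) =====
-- stated objective: alternative
-- what changed: Instead of A's per-rule chain of substring searches over the whole message, B makes a single left-to-right scan over the message positions with a keyword->rank table, keeping the lowest rank of any keyword that starts at each position, and indexes an intent array with the final best rank.
import Mathlib
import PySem

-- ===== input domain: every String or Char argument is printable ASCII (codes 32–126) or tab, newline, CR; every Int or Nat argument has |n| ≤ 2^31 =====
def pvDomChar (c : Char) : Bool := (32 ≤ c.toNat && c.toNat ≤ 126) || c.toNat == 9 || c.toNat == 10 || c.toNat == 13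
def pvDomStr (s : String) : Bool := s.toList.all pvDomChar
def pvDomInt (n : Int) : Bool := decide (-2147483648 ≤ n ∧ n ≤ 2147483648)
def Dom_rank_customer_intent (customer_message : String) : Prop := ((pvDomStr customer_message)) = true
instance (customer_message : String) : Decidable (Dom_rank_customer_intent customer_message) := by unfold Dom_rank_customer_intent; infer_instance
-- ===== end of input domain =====

-- B replaces A's per-rule substring cascade by a single left-to-right scan of the message that keeps the best (lowest) rank of any keyword occurrence found at each position (alternative algorithm, same behaviour).


-- ===== PORT A =====
def rank_customer_intent (customer_message : String) : String :=
  let msg_lower := PySem.Str.lower customer_message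
  if ["party", "celebration", "event"].any (fun w => PySem.Str.isIn w msg_lower) then
    "party_wear"
  else if ["wedding", "bride", "ceremony"].any (fun w => PySem.Str.isIn w msg_lower) then
    "wedding"
  else if ["office", "formal", "work", "corporate"].any (fun w => PySem.Str.isIn w msg_lower) then
    "formal"
  else if ["casual", "everyday", "comfort"].any (fun w => PySem.Str.isIn w msg_lower) then
    "casual"
  else if ["shoe", "footwear", "boot"].any (fun w => PySem.Str.isIn w msg_lower) then
    "shoes"
  else if ["price", "cost", "budget", "under", "cheap"].any (fun w => PySem.Str.isIn w msg_lower) then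
    "price_inquiry"
  else if ["help", "guide", "how", "assist"].any (fun w => PySem.Str.isIn w msg_lower) then
    "help"
  else if ["buy", "purchase", "checkout", "cart"].any (fun w => PySem.Str.isIn w msg_lower) then
    "purchase"
  else
    "browse"

-- ===== PORT B =====
-- PRIORITY dict: keyword -> rank (insertion order as in Source B)
def pvPRIORITY : List (String × Int) :=
  [("party", 0), ("celebration", 0), ("event", 0),
   ("wedding", 1), ("bride", 1), ("ceremony", 1),
   ("office", 2), ("formal", 2), ("work", 2), ("corporate", 2),
   ("casual", 3), ("everyday", 3), ("comfort", 3),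
   ("shoe", 4), ("footwear", 4), ("boot", 4),
   ("price", 5), ("cost", 5), ("budget", 5), ("under", 5), ("cheap", 5),
   ("help", 6), ("guide", 6), ("how", 6), ("assist", 6),
   ("buy", 7), ("purchase", 7), ("checkout", 7), ("cart", 7)]

def pvINTENTS : List String :=
  ["party_wear", "wedding", "formal", "casual", "shoes",
   "price_inquiry", "help", "purchase", "browse"]

-- single scan over the message positions, keeping the lowest rank whose keyword starts there
def rank_customer_intent_alt (customer_message : String) : String :=
  let msg := PySem.Str.lower customer_message
  let best :=
    (PySem.List.pyRange 0 (PySem.Str.len msg) 1).foldl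
      (fun best i =>
        pvPRIORITY.foldl
          (fun best wr =>
            if wr.2 < best ∧ PySem.Str.slice msg (some i) (some (i + PySem.Str.len wr.1)) = wr.1
            then wr.2 else best)
          best)
      ((pvINTENTS.length : Int) - 1)
  PySem.List.pyGetD pvINTENTS best ""

-- ===== PRECONDITION & SPEC =====
def Spec_rank_customer_intent (customer_message : String) (out : String) : Prop := out = rank_customer_intent_alt customer_message
instance (customer_message : String) (out : String) : Decidable (Spec_rank_customer_intent customer_message out) := by unfold Spec_rank_customer_intent; infer_instance

-- ===== CLAIM (what is proved, stated in full; the proofs are below) =====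
def Claim_equal_rank_customer_intent : Prop := ∀ (customer_message : String), Dom_rank_customer_intent customer_message → Spec_rank_customer_intent customer_message (rank_customer_intent customer_message)

-- ===== LEMMAS AND PROOFS =====

-- the flattened position × keyword pair list the double loop traverses
def pvL (N : Int) : List (Int × (String × Int)) :=
  (PySem.List.pyRange 0 N 1).flatMap (fun i => pvPRIORITY.map (fun wr => (i, wr)))

def pvStep (t : String) (b : Int) (x : Int × (String × Int)) : Int :=
  if x.2.2 < b ∧ PySem.Str.slice t (some x.1) (some (x.1 + PySem.Str.len x.2.1)) = x.2.1
  then x.2.2 else b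

def pvBest (t : String) : Int := (pvL (PySem.Str.len t)).foldl (pvStep t) 8

-- A's rule table, used only to phrase the proof
def pvRule (r : Int) : List String :=
  if r = 0 then ["party", "celebration", "event"]
  else if r = 1 then ["wedding", "bride", "ceremony"]
  else if r = 2 then ["office", "formal", "work", "corporate"]
  else if r = 3 then ["casual", "everyday", "comfort"]
  else if r = 4 then ["shoe", "footwear", "boot"]
  else if r = 5 then ["price", "cost", "budget", "under", "cheap"]
  else if r = 6 then ["help", "guide", "how", "assist"]
  else if r = 7 then ["buy", "purchase", "checkout", "cart"]
  else []

def pvCond (t : String) (r : Int) : Bool := (pvRule r).any (fun w => PySem.Str.isIn w t)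

-- generic facts about the "keep the smaller matching value" fold
theorem pvFoldLe {α : Type} (f : α → Int) (Q : α → Prop) [DecidablePred Q]
    (l : List α) (b0 : Int) :
    l.foldl (fun b x => if f x < b ∧ Q x then f x else b) b0 ≤ b0 := by
  induction l generalizing b0 with
  | nil => simp
  | cons y ys ih =>
    simp only [List.foldl_cons]
    split_ifs with h
    · exact le_trans (ih _) (le_of_lt h.1)
    · exact ih _

theorem pvFoldLeMatched {α : Type} (f : α → Int) (Q : α → Prop) [DecidablePred Q]
    (l : List α) (b0 : Int) (x : α) (hx : x ∈ l) (hq : Q x) :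
    l.foldl (fun b x => if f x < b ∧ Q x then f x else b) b0 ≤ f x := by
  induction l generalizing b0 with
  | nil => cases hx
  | cons y ys ih =>
    simp only [List.foldl_cons]
    rcases List.mem_cons.mp hx with rfl | hmem
    · split_ifs with h
      · exact pvFoldLe f Q ys (f x)
      · have : ¬ f x < b0 := fun hlt => h ⟨hlt, hq⟩
        exact le_trans (pvFoldLe f Q ys b0) (by omega)
    · split_ifs with h
      · exact ih _ hmem
      · exact ih _ hmem

theorem pvFoldCases {α : Type} (f : α → Int) (Q : α → Prop) [DecidablePred Q]
    (l : List α) (b0 : Int) :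
    l.foldl (fun b x => if f x < b ∧ Q x then f x else b) b0 = b0 ∨
      ∃ x ∈ l, Q x ∧ l.foldl (fun b x => if f x < b ∧ Q x then f x else b) b0 = f x := by
  induction l generalizing b0 with
  | nil => exact Or.inl rfl
  | cons y ys ih =>
    simp only [List.foldl_cons]
    split_ifs with h
    · rcases ih (f y) with h1 | ⟨x, hx, hq, he⟩
      · exact Or.inr ⟨y, List.mem_cons_self, h.2, h1⟩
      · exact Or.inr ⟨x, List.mem_cons_of_mem _ hx, hq, he⟩
    · rcases ih b0 with h1 | ⟨x, hx, hq, he⟩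
      · exact Or.inl h1
      · exact Or.inr ⟨x, List.mem_cons_of_mem _ hx, hq, he⟩

theorem pvAltEq (m : String) :
    rank_customer_intent_alt m =
      PySem.List.pyGetD pvINTENTS (pvBest (PySem.Str.lower m)) "" := by
  unfold rank_customer_intent_alt pvBest pvL pvStep
  rw [List.foldl_flatMap]
  simp only [List.foldl_map]
  norm_num [pvINTENTS]

theorem pvMemL (N : Int) (x : Int × (String × Int)) :
    x ∈ pvL N ↔ x.1 ∈ PySem.List.pyRange 0 N 1 ∧ x.2 ∈ pvPRIORITY := by
  unfold pvL
  simp only [List.mem_flatMap, List.mem_map]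
  constructor
  · rintro ⟨i, hi, wr, hwr, rfl⟩; exact ⟨hi, hwr⟩
  · rintro ⟨h1, h2⟩; exact ⟨x.1, h1, x.2, h2, rfl⟩

-- the slice comparison at a nonnegative position is a prefix test on the dropped tail
theorem pvSliceIff (t w : String) (i : Int) (hi : 0 ≤ i) :
    (PySem.Str.slice t (some i) (some (i + PySem.Str.len w)) = w) ↔
      w.toList <+: t.toList.drop i.toNat := by
  rw [String.ext_iff]
  have h1 : (PySem.Str.slice t (some i) (some (i + PySem.Str.len w))).toList
      = PySem.List.slice t.toList (some i) (some (i + PySem.Str.len w)) := by simp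
  have hw : PySem.Str.len w = (w.toList.length : Int) := by simp
  rw [h1, hw, PySem.List.slice_toNat _ hi (by omega)]
  have h2 : ((i + (w.toList.length : Int)).toNat - i.toNat) = w.toList.length := by omega
  rw [h2, List.prefix_iff_eq_take, eq_comm]

-- nonempty keyword occurs at some scanned position iff it is a substring
theorem pvExistsIff (s w : List Char) (hw : w ≠ []) :
    (∃ i ∈ PySem.List.pyRange 0 (s.length : Int) 1, w <+: s.drop i.toNat) ↔
      PySem.Chars.isIn w s = true := by
  rw [← PySem.Chars.exists_prefix_drop_iff_isIn]
  constructor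
  · rintro ⟨i, _, hp⟩; exact ⟨i.toNat, hp⟩
  · rintro ⟨j, hp⟩
    have hj : j < s.length := by
      by_contra hge
      rw [List.drop_eq_nil_of_le (by omega)] at hp
      exact hw (List.prefix_nil.mp hp)
    refine ⟨(j : Int), ?_, by simpa using hp⟩
    rw [PySem.List.mem_pyRange_one]
    constructor <;> [positivity; exact_mod_cast hj]

set_option maxHeartbeats 1000000 in
theorem pvMatchedCond (t : String) (wr : String × Int) (h : wr ∈ pvPRIORITY)
    (hin : PySem.Str.isIn wr.1 t = true) :
    0 ≤ wr.2 ∧ wr.2 ≤ 7 ∧ pvCond t wr.2 = true := by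
  fin_cases h <;>
    exact ⟨by norm_num, by norm_num, by simp [pvCond, pvRule] at hin ⊢; simp [hin]⟩

set_option maxHeartbeats 1000000 in
theorem pvCondMatched (t : String) (r : Int) (h0 : 0 ≤ r) (h7 : r ≤ 7)
    (hc : pvCond t r = true) :
    ∃ w : String, (w, r) ∈ pvPRIORITY ∧ w.toList ≠ [] ∧ PySem.Str.isIn w t = true := by
  interval_cases r <;>
    · simp only [pvCond, pvRule, List.any_eq_true] at hc
      obtain ⟨w, hw, hin⟩ := hc
      exact ⟨w, by fin_cases hw <;> simp [pvPRIORITY], by fin_cases hw <;> decide, by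
        fin_cases hw <;> exact hin⟩

set_option maxHeartbeats 1000000 in
theorem pvBest_le_of_cond (t : String) (r : Int) (h0 : 0 ≤ r) (h7 : r ≤ 7)
    (hc : pvCond t r = true) : pvBest t ≤ r := by
  obtain ⟨w, hmem, hne, hin⟩ := pvCondMatched t r h0 h7 hc
  have hin' : PySem.Chars.isIn w.toList t.toList = true := by simpa using hin
  obtain ⟨i, hi, hp⟩ := (pvExistsIff t.toList w.toList hne).mpr hin'
  have hi0 : 0 ≤ i := ((PySem.List.mem_pyRange_one).mp hi).1
  have hq : PySem.Str.slice t (some i) (some (i + PySem.Str.len w)) = w :=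
    (pvSliceIff t w i hi0).mpr hp
  have hx : ((i, (w, r)) : Int × (String × Int)) ∈ pvL (PySem.Str.len t) := by
    rw [pvMemL]
    exact ⟨by simpa using hi, hmem⟩
  exact pvFoldLeMatched (fun x => x.2.2)
    (fun x => PySem.Str.slice t (some x.1) (some (x.1 + PySem.Str.len x.2.1)) = x.2.1)
    (pvL (PySem.Str.len t)) 8 (i, (w, r)) hx hq

theorem pvBest_cases (t : String) :
    pvBest t = 8 ∨ ∃ r : Int, 0 ≤ r ∧ r ≤ 7 ∧ pvCond t r = true ∧ pvBest t = r := by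
  rcases pvFoldCases (fun x : Int × (String × Int) => x.2.2)
      (fun x => PySem.Str.slice t (some x.1) (some (x.1 + PySem.Str.len x.2.1)) = x.2.1)
      (pvL (PySem.Str.len t)) 8 with h | ⟨x, hx, hq, he⟩
  · exact Or.inl h
  · obtain ⟨hi, hmem⟩ := (pvMemL _ x).mp hx
    have hi0 : 0 ≤ x.1 := ((PySem.List.mem_pyRange_one).mp (by simpa using hi)).1
    have hp : x.2.1.toList <+: t.toList.drop x.1.toNat := (pvSliceIff t x.2.1 x.1 hi0).mp hq
    have hin : PySem.Str.isIn x.2.1 t = true := by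
      have : PySem.Chars.isIn x.2.1.toList t.toList = true :=
        (PySem.Chars.exists_prefix_drop_iff_isIn _ _).mp ⟨x.1.toNat, hp⟩
      simpa using this
    obtain ⟨hr0, hr7, hcond⟩ := pvMatchedCond t x.2 hmem hin
    exact Or.inr ⟨x.2.2, hr0, hr7, hcond, he⟩

-- ===== VERDICT (by name: the statement is the Claim_ definition above) =====
set_option maxHeartbeats 2000000 in
theorem rank_customer_intent_spec : Claim_equal_rank_customer_intent := by
  intro m _
  unfold Spec_rank_customer_intent
  rw [pvAltEq]
  set t := PySem.Str.lower m with ht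
  have hA : rank_customer_intent m =
      (if pvCond t 0 then "party_wear"
       else if pvCond t 1 then "wedding"
       else if pvCond t 2 then "formal"
       else if pvCond t 3 then "casual"
       else if pvCond t 4 then "shoes"
       else if pvCond t 5 then "price_inquiry"
       else if pvCond t 6 then "help"
       else if pvCond t 7 then "purchase"
       else "browse") := by
    simp only [rank_customer_intent, pvCond, pvRule, ht]
    norm_num
  rw [hA]
  have hle := fun (r : Int) h0 h7 hc => pvBest_le_of_cond t r h0 h7 hc
  have hcases := pvBest_cases t
  by_cases h0 : pvCond t 0 = true
  · have hge : (0:Int) ≤ pvBest t := by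
      rcases hcases with h | ⟨r, hr0, hr7, hcr, he⟩
      · omega
      · omega
    have hb : pvBest t = 0 :=
      le_antisymm (hle 0 (by norm_num) (by norm_num) h0) hge
    rw [hb]
    simp [h0]
    decide
  simp only [Bool.not_eq_true] at h0
  by_cases h1 : pvCond t 1 = true
  · have hge : (1:Int) ≤ pvBest t := by
      rcases hcases with h | ⟨r, hr0, hr7, hcr, he⟩
      · omega
      · have : (1:Int) ≤ r := by
          by_contra hlt
          push Not at hlt
          interval_cases r <;> simp_all
        omega
    have hb : pvBest t = 1 :=
      le_antisymm (hle 1 (by norm_num) (by norm_num) h1) hge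
    rw [hb]
    simp [h0, h1]
    decide
  simp only [Bool.not_eq_true] at h1
  by_cases h2 : pvCond t 2 = true
  · have hge : (2:Int) ≤ pvBest t := by
      rcases hcases with h | ⟨r, hr0, hr7, hcr, he⟩
      · omega
      · have : (2:Int) ≤ r := by
          by_contra hlt
          push Not at hlt
          interval_cases r <;> simp_all
        omega
    have hb : pvBest t = 2 :=
      le_antisymm (hle 2 (by norm_num) (by norm_num) h2) hge
    rw [hb]
    simp [h0, h1, h2]
    decide
  simp only [Bool.not_eq_true] at h2
  by_cases h3 : pvCond t 3 = true
  · have hge : (3:Int) ≤ pvBest t := by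
      rcases hcases with h | ⟨r, hr0, hr7, hcr, he⟩
      · omega
      · have : (3:Int) ≤ r := by
          by_contra hlt
          push Not at hlt
          interval_cases r <;> simp_all
        omega
    have hb : pvBest t = 3 :=
      le_antisymm (hle 3 (by norm_num) (by norm_num) h3) hge
    rw [hb]
    simp [h0, h1, h2, h3]
    decide
  simp only [Bool.not_eq_true] at h3
  by_cases h4 : pvCond t 4 = true
  · have hge : (4:Int) ≤ pvBest t := by
      rcases hcases with h | ⟨r, hr0, hr7, hcr, he⟩
      · omega
      · have : (4:Int) ≤ r := by
          by_contra hlt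
          push Not at hlt
          interval_cases r <;> simp_all
        omega
    have hb : pvBest t = 4 :=
      le_antisymm (hle 4 (by norm_num) (by norm_num) h4) hge
    rw [hb]
    simp [h0, h1, h2, h3, h4]
    decide
  simp only [Bool.not_eq_true] at h4
  by_cases h5 : pvCond t 5 = true
  · have hge : (5:Int) ≤ pvBest t := by
      rcases hcases with h | ⟨r, hr0, hr7, hcr, he⟩
      · omega
      · have : (5:Int) ≤ r := by
          by_contra hlt
          push Not at hlt
          interval_cases r <;> simp_all
        omega
    have hb : pvBest t = 5 :=
      le_antisymm (hle 5 (by norm_num) (by norm_num) h5) hge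
    rw [hb]
    simp [h0, h1, h2, h3, h4, h5]
    decide
  simp only [Bool.not_eq_true] at h5
  by_cases h6 : pvCond t 6 = true
  · have hge : (6:Int) ≤ pvBest t := by
      rcases hcases with h | ⟨r, hr0, hr7, hcr, he⟩
      · omega
      · have : (6:Int) ≤ r := by
          by_contra hlt
          push Not at hlt
          interval_cases r <;> simp_all
        omega
    have hb : pvBest t = 6 :=
      le_antisymm (hle 6 (by norm_num) (by norm_num) h6) hge
    rw [hb]
    simp [h0, h1, h2, h3, h4, h5, h6]
    decide
  simp only [Bool.not_eq_true] at h6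
  by_cases h7 : pvCond t 7 = true
  · have hge : (7:Int) ≤ pvBest t := by
      rcases hcases with h | ⟨r, hr0, hr7, hcr, he⟩
      · omega
      · have : (7:Int) ≤ r := by
          by_contra hlt
          push Not at hlt
          interval_cases r <;> simp_all
        omega
    have hb : pvBest t = 7 :=
      le_antisymm (hle 7 (by norm_num) (by norm_num) h7) hge
    rw [hb]
    simp [h0, h1, h2, h3, h4, h5, h6, h7]
    decide
  simp only [Bool.not_eq_true] at h7
  -- no rule matches: best stays 8 and A falls through to "browse"
  have hb : pvBest t = 8 := by
    rcases hcases with h | ⟨r, hr0, hr7, hcr, he⟩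
    · exact h
    · exfalso
      interval_cases r <;> simp_all
  rw [hb]
  simp [h0, h1, h2, h3, h4, h5, h6, h7]
  decide
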